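-- pv_equiv track=rewrite | github.com/choi-jiae/Baekjoon | 프로그래머스/1/42862. 체육복/체육복.py | solution
-- ===== SOURCE A (Python) =====
-- def solution(n, lost, reserve):
--
--     # 여벌 체육복을 가져온 학생이 도난 당한 경우 고려 (자기 자신에게 빌려간다고 생각)
--     total_lost = list(set(lost)-set(reserve))
--     total_reserve = list(set(reserve)-set(lost))
--     total_lost.sort()
--
--     # 인덱스가 아니니까 1,n의 경우 고려하지 않아도됨!!
--     # 순회를 위한 _lost
--     _lost = total_lost.copy()
--     for l in _lost:
--         f = l-1
--         b = l+1
--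
--         if f in total_reserve:
--             total_lost.remove(l)
--             total_reserve.remove(f)
--
--         elif b in total_reserve:
--             total_lost.remove(l)
--             total_reserve.remove(b)
--
--
--     answer = n - len(total_lost)
--     return answer
-- ===== SOURCE B (Python) =====
-- def solution(n, lost, reserve):
--     # Two-pointer merge of the two sorted disjoint lists: each needy student is
--     # matched against the smallest still-available spare in one linear sweep.
--     need = sorted(set(lost) - set(reserve))
--     spare = sorted(set(reserve) - set(lost))
--     j = 0
--     unmatched = 0
--     for l in need:
--         while j < len(spare) and spare[j] < l - 1:
--             j += 1
--         if j < len(spare) and spare[j] <= l + 1: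
--             j += 1
--         else:
--             unmatched += 1
--     return n - unmatched
-- ===== Notes on version B (the rewrite author's own statement) =====
-- stated objective: faster
-- what changed: Replaces A's per-lost-student membership tests and O(n) list.remove() mutations by a single two-pointer merge of the sorted need and sorted spare lists with an unmatched counter.
import Mathlib
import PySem

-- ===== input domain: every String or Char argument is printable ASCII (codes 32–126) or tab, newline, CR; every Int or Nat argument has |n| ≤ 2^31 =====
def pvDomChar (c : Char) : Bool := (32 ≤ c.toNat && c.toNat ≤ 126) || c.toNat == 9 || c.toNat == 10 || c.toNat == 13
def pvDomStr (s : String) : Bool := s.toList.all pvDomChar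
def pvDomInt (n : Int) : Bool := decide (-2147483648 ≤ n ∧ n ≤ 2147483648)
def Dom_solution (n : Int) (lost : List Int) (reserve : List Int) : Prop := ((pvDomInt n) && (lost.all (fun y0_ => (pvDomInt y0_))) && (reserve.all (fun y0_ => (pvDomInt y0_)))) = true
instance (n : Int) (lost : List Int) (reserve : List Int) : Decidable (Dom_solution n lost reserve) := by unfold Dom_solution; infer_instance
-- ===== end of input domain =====

-- B replaces A's per-student membership tests with list .remove() by a single two-pointer
-- merge of the two sorted lists (alternative algorithm); return values only — neither mutates its arguments.

-- ===== PORT A =====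
-- step of A's loop: state = (total_lost, total_reserve); list .remove via PySem.List.remove?
-- (the .getD fallback is never taken: the removed element is always present)
def solStepA (st : List Int × List Int) (l : Int) : List Int × List Int :=
  if st.2.contains (l - 1) then
    ((PySem.List.remove? st.1 l).getD st.1, (PySem.List.remove? st.2 (l - 1)).getD st.2)
  else if st.2.contains (l + 1) then
    ((PySem.List.remove? st.1 l).getD st.1, (PySem.List.remove? st.2 (l + 1)).getD st.2)
  else st

def solution (n : Int) (lost : List Int) (reserve : List Int) : Int :=
  let totalLost0 : List Int := PySem.Set.diff (PySem.Set.ofList lost) reserve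
  let totalReserve : List Int := PySem.Set.diff (PySem.Set.ofList reserve) lost
  let totalLost := PySem.List.sorted totalLost0 (fun x => x) false
  let st := totalLost.foldl solStepA (totalLost, totalReserve)
  n - st.1.length

-- ===== PORT B =====
-- Source B's inner 'while j < len(spare) and spare[j] < l-1: j += 1', with the index j
-- represented as the remaining suffix of spare
def skipLow (l : Int) : List Int → List Int
  | [] => []
  | s :: rest => if s < l - 1 then skipLow l rest else s :: rest

-- step of Source B's for-loop: state = (remaining spare suffix, unmatched)
def solStepB (st : List Int × Int) (l : Int) : List Int × Int :=
  match skipLow l st.1 with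
  | [] => ([], st.2 + 1)
  | s :: rest => if s ≤ l + 1 then (rest, st.2) else (s :: rest, st.2 + 1)

def solution_alt (n : Int) (lost : List Int) (reserve : List Int) : Int :=
  let need := PySem.List.sorted (PySem.Set.diff (PySem.Set.ofList lost) reserve) (fun x => x) false
  let spare := PySem.List.sorted (PySem.Set.diff (PySem.Set.ofList reserve) lost) (fun x => x) false
  let st := need.foldl solStepB (spare, 0)
  n - st.2

-- ===== PRECONDITION & SPEC =====
def Spec_solution (n : Int) (lost : List Int) (reserve : List Int) (out : Int) : Prop := out = solution_alt n lost reserve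
instance (n : Int) (lost : List Int) (reserve : List Int) (out : Int) : Decidable (Spec_solution n lost reserve out) := by unfold Spec_solution; infer_instance

-- ===== CLAIM (what is proved, stated in full; the proofs are below) =====
def Claim_equal_solution : Prop := ∀ (n : Int) (lost : List Int) (reserve : List Int), Dom_solution n lost reserve → Spec_solution n lost reserve (solution n lost reserve)

-- ===== LEMMAS AND PROOFS =====

lemma skipLow_suffix (l : Int) (V : List Int) : (skipLow l V).IsSuffix V := by
  induction V with
  | nil => simp [skipLow]
  | cons s rest ih =>
      by_cases h : s < l - 1
      · simp only [skipLow, if_pos h]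
        exact ih.trans (List.suffix_cons s rest)
      · simp [skipLow, if_neg h]

lemma mem_skipLow {l x : Int} {V : List Int} (h : x ∈ skipLow l V) : x ∈ V :=
  (skipLow_suffix l V).subset h

lemma skipLow_dropped {l x : Int} {V : List Int} (hx : x ∈ V) (hn : x ∉ skipLow l V) :
    x < l - 1 := by
  induction V with
  | nil => cases hx
  | cons s rest ih =>
      by_cases h : s < l - 1
      · rw [skipLow, if_pos h] at hn
        rcases List.mem_cons.mp hx with he | hm
        · exact he ▸ h
        · exact ih hm hn
      · rw [skipLow, if_neg h] at hn
        exact absurd hx hn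

lemma skipLow_head_ge {l s : Int} {V rest : List Int} (h : skipLow l V = s :: rest) :
    l - 1 ≤ s := by
  induction V with
  | nil => simp [skipLow] at h
  | cons a r ih =>
      by_cases ha : a < l - 1
      · rw [skipLow, if_pos ha] at h; exact ih h
      · rw [skipLow, if_neg ha] at h
        cases h; omega

-- the loop invariant: A's fold over (remaining lost TL, remaining reserve TR) versus
-- Source B's fold over (remaining sorted-spare suffix V, unmatched counter u)
lemma loop_inv (L : List Int) (TL TR V : List Int) (u : Int)
    (hVT : ∀ x ∈ V, x ∈ TR)
    (hlow : ∀ x ∈ TR, x ∉ V → ∀ l ∈ L, x < l - 1)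
    (hV : V.Pairwise (· < ·))
    (hL : L.Pairwise (· < ·))
    (hdis : ∀ l ∈ L, l ∉ TR)
    (hLTL : ∀ l ∈ L, l ∈ TL)
    (hTLnd : TL.Nodup) (hTRnd : TR.Nodup) :
    ((L.foldl solStepA (TL, TR)).1.length : Int)
      = (TL.length : Int) - (L.length : Int) + ((L.foldl solStepB (V, u)).2 - u) := by
  induction L generalizing TL TR V u with
  | nil => simp
  | cons l L ih =>
      have hlTL : l ∈ TL := hLTL l (by simp)
      have hlt : ∀ l' ∈ L, l < l' := fun l' hl' => (List.pairwise_cons.mp hL).1 l' hl'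
      have hremTL : (PySem.List.remove? TL l).getD TL = TL.erase l := by
        rw [PySem.List.remove?_eq_some_erase TL l hlTL]; rfl
      have hlenTL : ((TL.erase l).length : Int) = (TL.length : Int) - 1 := by
        rw [List.length_erase_of_mem hlTL]
        have : 1 ≤ TL.length := List.length_pos_of_mem hlTL
        omega
      -- membership in TR reduces to membership in V (elements of TR \ V are < l - 1)
      have hmemTR : ∀ y : Int, l - 1 ≤ y → (y ∈ TR ↔ y ∈ V) := by
        intro y hy
        constructor
        · intro hyTR
          by_contra hyV
          have := hlow y hyTR hyV l (by simp)
          omega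
        · exact hVT y
      -- and membership in V of anything ≥ l-1 reduces to membership in skipLow l V
      have hmemV : ∀ y : Int, y ∈ V → y ∉ skipLow l V → y < l - 1 := fun y => skipLow_dropped
      have hV' : (skipLow l V).Pairwise (· < ·) := hV.sublist (skipLow_suffix l V).sublist
      have hlnotTR : l ∉ TR := hdis l (by simp)
      simp only [List.foldl_cons]
      cases hsk : skipLow l V with
      | nil =>
          -- V' empty: neither l-1 nor l+1 is available; both sides leave a student unmatched
          have hf : l - 1 ∉ TR := by
            intro h
            have := (hmemTR (l - 1) (by omega)).mp h
            have := hmemV (l - 1) this (by simp [hsk])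
            omega
          have hb : l + 1 ∉ TR := by
            intro h
            have := (hmemTR (l + 1) (by omega)).mp h
            have := hmemV (l + 1) this (by simp [hsk])
            omega
          have hbA : solStepA (TL, TR) l = (TL, TR) := by
            simp [solStepA, hf, hb]
          have hbB : solStepB (V, u) l = ([], u + 1) := by
            simp [solStepB, hsk]
          rw [hbA, hbB]
          have := ih TL TR [] (u + 1)
            (by simp)
            (by
              intro x hx _ l' hl'
              by_cases hxV : x ∈ V
              · have := hmemV x hxV (by simp [hsk])
                have := hlt l' hl'
                omega
              · exact hlow x hx hxV l' (by simp [hl']))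
            (by simp)
            (List.pairwise_cons.mp hL).2
            (fun l' hl' => hdis l' (by simp [hl']))
            (fun l' hl' => hLTL l' (by simp [hl']))
            hTLnd hTRnd
          rw [this]; simp only [List.length_cons]; push_cast; omega
      | cons s rest =>
          have hs_ge : l - 1 ≤ s := skipLow_head_ge hsk
          have hsV : s ∈ V := mem_skipLow (l := l) (by simp [hsk])
          have hsTR : s ∈ TR := hVT s hsV
          have hrest_gt : ∀ x ∈ rest, s < x := fun x hx =>
            (List.pairwise_cons.mp (hsk ▸ hV')).1 x hx
          have hsl : s ≠ l := fun he => hlnotTR (he ▸ hsTR)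
          -- anything ≥ l-1 that is still in TR lies in the suffix s :: rest
          have hmemV2 : ∀ y : Int, l - 1 ≤ y → y ∈ TR → y ∈ s :: rest := by
            intro y h1 hyTR
            have hyV := (hmemTR y h1).mp hyTR
            have hyV' : y ∈ skipLow l V := by
              by_contra hn
              have := hmemV y hyV hn; omega
            rw [hsk] at hyV'
            exact hyV'
          by_cases hf : (l - 1) ∈ TR
          · -- A lends from the left; B's head is exactly l-1
            have hse : s = l - 1 := by
              rcases List.mem_cons.mp (hmemV2 (l - 1) (by omega) hf) with he | hm
              · omega
              · have := hrest_gt _ hm; omega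
            have hbA : solStepA (TL, TR) l = (TL.erase l, TR.erase (l - 1)) := by
              simp [solStepA, hf, hremTL, PySem.List.remove?_eq_some_erase TR (l - 1) hf]
            have hbB : solStepB (V, u) l = (rest, u) := by
              simp only [solStepB, hsk]
              rw [if_pos (show s ≤ l + 1 by omega)]
            rw [hbA, hbB]
            have := ih (TL.erase l) (TR.erase (l - 1)) rest u
              (by
                intro x hx
                have hxs : s < x := hrest_gt x hx
                refine (List.mem_erase_of_ne (by omega)).mpr
                  (hVT x (mem_skipLow (l := l) (by simp [hsk, hx])))
              )
              (by
                intro x hx hxrest l' hl'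
                have hxTR : x ∈ TR := List.mem_of_mem_erase hx
                have hxne : x ≠ l - 1 := by
                  intro he
                  exact (List.Nodup.not_mem_erase hTRnd) (he ▸ hx)
                have hll' : l < l' := hlt l' hl'
                by_cases hxV : x ∈ V
                · by_cases hxV' : x ∈ skipLow l V
                  · rw [hsk] at hxV'
                    rcases List.mem_cons.mp hxV' with he | hm
                    · omega
                    · exact absurd hm hxrest
                  · have := hmemV x hxV hxV'; omega
                · exact hlow x hxTR hxV l' (by simp [hl']))
              ((List.pairwise_cons.mp (hsk ▸ hV')).2)
              (List.pairwise_cons.mp hL).2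
              (fun l' hl' => fun h => hdis l' (by simp [hl']) (List.mem_of_mem_erase h))
              (fun l' hl' => (List.mem_erase_of_ne (by have := hlt l' hl'; omega)).mpr
                (hLTL l' (by simp [hl'])))
              (hTLnd.erase l) (hTRnd.erase (l - 1))
            rw [this, hlenTL]; simp only [List.length_cons]; push_cast; omega
          · by_cases hb : (l + 1) ∈ TR
            · -- A lends from the right; B's head is exactly l+1
              have hsne : s ≠ l - 1 := fun he => hf (he ▸ hsTR)
              have hse : s = l + 1 := by
                rcases List.mem_cons.mp (hmemV2 (l + 1) (by omega) hb) with he | hm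
                · omega
                · have := hrest_gt _ hm; omega
              have hbA : solStepA (TL, TR) l = (TL.erase l, TR.erase (l + 1)) := by
                simp [solStepA, hf, hb, hremTL, PySem.List.remove?_eq_some_erase TR (l + 1) hb]
              have hbB : solStepB (V, u) l = (rest, u) := by
                simp only [solStepB, hsk]
                rw [if_pos (show s ≤ l + 1 by omega)]
              rw [hbA, hbB]
              have := ih (TL.erase l) (TR.erase (l + 1)) rest u
                (by
                  intro x hx
                  have hxs : s < x := hrest_gt x hx
                  refine (List.mem_erase_of_ne (by omega)).mpr
                    (hVT x (mem_skipLow (l := l) (by simp [hsk, hx]))))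
                (by
                  intro x hx hxrest l' hl'
                  have hxTR : x ∈ TR := List.mem_of_mem_erase hx
                  have hxne : x ≠ l + 1 := by
                    intro he
                    exact (List.Nodup.not_mem_erase hTRnd) (he ▸ hx)
                  have hll' : l < l' := hlt l' hl'
                  by_cases hxV : x ∈ V
                  · by_cases hxV' : x ∈ skipLow l V
                    · rw [hsk] at hxV'
                      rcases List.mem_cons.mp hxV' with he | hm
                      · omega
                      · exact absurd hm hxrest
                    · have := hmemV x hxV hxV'; omega
                  · exact hlow x hxTR hxV l' (by simp [hl']))
                ((List.pairwise_cons.mp (hsk ▸ hV')).2)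
                (List.pairwise_cons.mp hL).2
                (fun l' hl' => fun h => hdis l' (by simp [hl']) (List.mem_of_mem_erase h))
                (fun l' hl' => (List.mem_erase_of_ne (by have := hlt l' hl'; omega)).mpr
                  (hLTL l' (by simp [hl'])))
                (hTLnd.erase l) (hTRnd.erase (l + 1))
              rw [this, hlenTL]; simp only [List.length_cons]; push_cast; omega
            · -- neither neighbour is available: B's head is > l+1, both sides skip
              have hs_gt : l + 1 < s := by
                have h1 : s ≠ l - 1 := fun he => hf (he ▸ hsTR)
                have h2 : s ≠ l + 1 := fun he => hb (he ▸ hsTR)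
                omega
              have hbA : solStepA (TL, TR) l = (TL, TR) := by
                simp [solStepA, hf, hb]
              have hbB : solStepB (V, u) l = (s :: rest, u + 1) := by
                simp only [solStepB, hsk]
                rw [if_neg (show ¬ s ≤ l + 1 by omega)]
              rw [hbA, hbB]
              have := ih TL TR (s :: rest) (u + 1)
                (fun x hx => hVT x (mem_skipLow (l := l) (hsk ▸ hx)))
                (by
                  intro x hx hxV' l' hl'
                  have hll' : l < l' := hlt l' hl'
                  by_cases hxV : x ∈ V
                  · have : x ∈ skipLow l V → False := fun h => hxV' (hsk ▸ h)
                    have := hmemV x hxV (by intro h; exact this h)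
                    omega
                  · exact hlow x hx hxV l' (by simp [hl']))
                (hsk ▸ hV')
                (List.pairwise_cons.mp hL).2
                (fun l' hl' => hdis l' (by simp [hl']))
                (fun l' hl' => hLTL l' (by simp [hl']))
                hTLnd hTRnd
              rw [this]; simp only [List.length_cons]; push_cast; omega

-- ===== VERDICT (by name: the statement is the Claim_ definition above) =====
theorem solution_spec : Claim_equal_solution := by
  intro n lost reserve _
  unfold Spec_solution solution solution_alt
  dsimp only
  set TLraw := PySem.Set.diff (PySem.Set.ofList lost) reserve with hTLraw
  set TR := PySem.Set.diff (PySem.Set.ofList reserve) lost with hTR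
  set need := PySem.List.sorted TLraw (fun x => x) false with hneed
  set spare := PySem.List.sorted TR (fun x => x) false with hspare
  have hTRnd : TR.Nodup :=
    PySem.Set.nodup_diff (PySem.Set.ofList reserve) lost (PySem.Set.nodup_ofList reserve)
  have hneednd : need.Nodup :=
    (PySem.List.sorted_perm _ _ _).nodup_iff.mpr
      (PySem.Set.nodup_diff (PySem.Set.ofList lost) reserve (PySem.Set.nodup_ofList lost))
  have hsparend : spare.Nodup := (PySem.List.sorted_perm _ _ _).nodup_iff.mpr hTRnd
  have hpwlt : ∀ (xs : List Int), xs.Nodup → xs.Pairwise (fun a b => (a : Int) ≤ b) →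
      xs.Pairwise (· < ·) := by
    intro xs h1 h2
    exact (h1.and h2).imp (fun {a b} hab => lt_of_le_of_ne hab.2 hab.1)
  have hneedpw : need.Pairwise (· < ·) :=
    hpwlt need hneednd (PySem.List.sorted_pairwise TLraw (fun x => x) )
  have hsparepw : spare.Pairwise (· < ·) :=
    hpwlt spare hsparend (PySem.List.sorted_pairwise TR (fun x => x))
  have hmemspare : ∀ x : Int, x ∈ spare ↔ x ∈ TR := fun x =>
    PySem.List.mem_sorted TR (fun x => x) false x
  have key := loop_inv need need TR spare 0
    (fun x hx => (hmemspare x).mp hx)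
    (fun x hx hxs _ _ => absurd ((hmemspare x).mpr hx) hxs)
    hsparepw
    hneedpw
    (by
      intro l hl
      have hlm : l ∈ TLraw := (PySem.List.mem_sorted _ _ _ _).mp hl
      have : l ∉ reserve := ((PySem.Set.mem_diff _ _ _).mp hlm).2
      intro hlTR
      have : l ∈ PySem.Set.ofList reserve := ((PySem.Set.mem_diff _ _ _).mp hlTR).1
      exact ‹l ∉ reserve› ((PySem.Set.mem_ofList _ _).mp this))
    (fun l hl => hl)
    hneednd hTRnd
  omega
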